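-- pv_equiv track=rewrite | github.com/CatalinaManduta/Python-Exercise-Solutions | Exercise 3.py | repeated_filter
-- ===== SOURCE A (Python) =====
-- def repeated_filter(xs):
--     """
--     Returns a list of elements from 'xs' that are not unique in 'xs'.
--
--     Args:
--         xs: List of integers.
--
--     Returns:
--         A list of elements from 'xs' that are not unique.
--     """
--     list1 = []
--     for i in range(len(xs)):
--         inde = i
--         val = xs[inde]
--         xs.pop(inde)
--         if val in xs:
--             list1.append(val)
--         else:
--             pass
--         xs.insert(inde, val)
--     return list1
-- ===== SOURCE B (Python) =====
-- def repeated_filter(xs):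
--     ys = sorted(xs)
--     dup = set()
--     for a, b in zip(ys, ys[1:]):
--         if a == b:
--             dup.add(b)
--     return [x for x in xs if x in dup]
-- ===== Notes on version B (the rewrite author's own statement) =====
-- stated objective: faster
-- what changed: Replaces A's per-index pop/membership-scan/insert loop (a linear 'in' scan plus two list shifts per element) with sort + one adjacent-pair pass building a duplicate set, then one filtering pass over the original order.
import Mathlib
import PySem

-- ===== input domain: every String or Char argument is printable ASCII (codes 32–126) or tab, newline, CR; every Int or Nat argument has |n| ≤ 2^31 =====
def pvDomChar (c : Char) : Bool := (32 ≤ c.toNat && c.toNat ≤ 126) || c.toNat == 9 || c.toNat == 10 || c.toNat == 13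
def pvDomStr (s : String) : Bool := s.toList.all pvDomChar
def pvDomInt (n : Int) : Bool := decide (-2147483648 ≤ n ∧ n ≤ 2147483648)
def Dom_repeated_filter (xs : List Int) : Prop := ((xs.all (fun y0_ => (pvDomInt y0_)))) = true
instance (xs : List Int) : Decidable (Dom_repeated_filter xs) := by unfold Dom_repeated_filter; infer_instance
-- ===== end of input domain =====

-- B replaces A's per-index pop / linear membership scan / insert loop with sort + one
-- adjacent-pair pass collecting duplicates into a set, then one filter pass in original order.
-- A mutates xs only transiently (each pop is undone by the insert), so the caller sees no
-- net mutation and return-value equivalence is the whole story.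

-- ===== PORT A =====
-- loop body: pop index i, test membership in the rest, insert back
-- (the 'none' branch is unreachable for i in range(len(xs)); it only makes the match total)
def repeated_filter (xs : List Int) : List Int :=
  ((PySem.List.pyRange 0 (PySem.List.len xs) 1).foldl
    (fun (st : List Int × List Int) i =>
      let inde := i
      let val := PySem.List.pyGetD st.1 inde 0
      match PySem.List.pop? st.1 inde with
      | some (_, rest) =>
          let list1 := if rest.contains val then st.2 ++ [val] else st.2
          (PySem.List.insert rest inde val, list1)
      | none => st)
    (xs, [])).2

-- ===== PORT B =====
def repeated_filter_alt (xs : List Int) : List Int :=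
  let ys := PySem.List.sorted xs (fun x => x) false
  let dup := (ys.zip (PySem.List.slice ys (some 1) none)).foldl
    (fun (s : PySem.Set Int) ab => if ab.1 == ab.2 then PySem.Set.add s ab.2 else s)
    PySem.Set.empty
  xs.filter (fun x => PySem.Set.contains dup x)

-- ===== PRECONDITION & SPEC =====
def Spec_repeated_filter (xs : List Int) (out : List Int) : Prop := out = repeated_filter_alt xs
instance (xs : List Int) (out : List Int) : Decidable (Spec_repeated_filter xs out) := by unfold Spec_repeated_filter; infer_instance

-- ===== CLAIM (what is proved, stated in full; the proofs are below) =====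
def Claim_equal_repeated_filter : Prop := ∀ (xs : List Int), Dom_repeated_filter xs → Spec_repeated_filter xs (repeated_filter xs)

-- ===== LEMMAS AND PROOFS =====

-- inserting the popped element back at its index restores the list
lemma erase_insert (xs : List Int) (a : Nat) (h : a < xs.length) :
    PySem.List.insert (xs.eraseIdx a) (a : Int) xs[a] = xs := by
  rw [PySem.List.insert_natCast _ a _ (by rw [List.length_eraseIdx_of_lt h]; omega)]
  rw [List.eraseIdx_eq_take_drop_succ]
  rw [List.take_append_of_le_length (by simp [Nat.le_of_lt h]), List.take_take]
  rw [List.drop_append_of_le_length (by simp [Nat.le_of_lt h])]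
  simp [List.getElem_cons_drop]

-- A's membership test 'val in xs-without-index-a' is exactly 'count ≥ 2'
lemma mem_erase_iff (xs : List Int) (a : Nat) (h : a < xs.length) :
    xs[a] ∈ xs.eraseIdx a ↔ 2 ≤ xs.count xs[a] := by
  set v := xs[a] with hv
  have hd : xs = xs.take a ++ v :: xs.drop (a+1) := by
    rw [hv, List.getElem_cons_drop, List.take_append_drop]
  rw [List.eraseIdx_eq_take_drop_succ, List.mem_append]
  conv_rhs => rw [hd]
  rw [List.count_append, List.count_cons_self]
  constructor
  · rintro (hm | hm) <;> · have := List.count_pos_iff.mpr hm; omega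
  · intro h2
    by_contra hc
    push Not at hc
    have h1 := List.count_eq_zero.mpr hc.1
    have h2' := List.count_eq_zero.mpr hc.2
    omega

-- A's loop from index a onward: xs is restored each step and the suffix's duplicates are appended
lemma a_loop_inv (xs : List Int) (a : Nat) (ha : a ≤ xs.length) : ∀ acc : List Int,
    ((PySem.List.pyRange (a : Int) (PySem.List.len xs) 1).foldl
      (fun (st : List Int × List Int) i =>
        let inde := i
        let val := PySem.List.pyGetD st.1 inde 0
        match PySem.List.pop? st.1 inde with
        | some (_, rest) =>
            let list1 := if rest.contains val then st.2 ++ [val] else st.2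
            (PySem.List.insert rest inde val, list1)
        | none => st)
      (xs, acc)) = (xs, acc ++ (xs.drop a).filter (fun v => 2 ≤ xs.count v)) := by
  induction hn : xs.length - a generalizing a with
  | zero =>
    intro acc
    have hae : a = xs.length := by omega
    rw [PySem.List.pyRange_one_eq_nil (by simp [hae])]
    simp [hae]
  | succ n ih =>
    intro acc
    have hlt : a < xs.length := by omega
    rw [PySem.List.pyRange_one_cons (by simp; omega)]
    rw [List.foldl_cons]
    have hpop : PySem.List.pop? xs (a : Int) = some (xs[a], xs.eraseIdx a) :=
      PySem.List.pop?_natCast xs a hlt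
    have hget : PySem.List.pyGetD xs (a : Int) 0 = xs[a] := by
      simp [PySem.List.pyGetD_natCast, List.getD_eq_getElem?_getD, hlt]
    simp only [hpop, hget, erase_insert xs a hlt]
    have hstep : ((a : Int) + 1) = ((a + 1 : Nat) : Int) := by push_cast; ring
    rw [hstep]
    rw [ih (a + 1) (by omega) (by omega)]
    have hdrop : xs.drop a = xs[a] :: xs.drop (a + 1) := (List.getElem_cons_drop hlt).symm
    rw [hdrop, List.filter_cons]
    by_cases hc : 2 ≤ xs.count xs[a] <;> simp [mem_erase_iff xs a hlt, hc]

lemma a_eq_filter (xs : List Int) :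
    repeated_filter xs = xs.filter (fun v => 2 ≤ xs.count v) := by
  have h := a_loop_inv xs 0 (Nat.zero_le _) []
  simpa [repeated_filter] using congrArg Prod.snd h

-- membership in B's duplicate-set fold = an adjacent equal pair of value v exists
lemma mem_dup_fold (ys : List Int) : ∀ (s : PySem.Set Int) (v : Int),
    (v ∈ (ys.zip ys.tail).foldl
      (fun (s : PySem.Set Int) ab => if ab.1 == ab.2 then PySem.Set.add s ab.2 else s) s)
    ↔ v ∈ s ∨ ∃ pre suf, ys = pre ++ v :: v :: suf := by
  induction ys with
  | nil =>
    intro s v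
    simp only [List.tail_nil, List.zip_nil_right, List.foldl_nil]
    constructor
    · exact Or.inl
    · rintro (h | ⟨pre, suf, h⟩)
      · exact h
      · simp at h
  | cons a t ih =>
    intro s v
    cases t with
    | nil =>
      simp only [List.tail_cons, List.zip_nil_right, List.foldl_nil]
      constructor
      · exact Or.inl
      · rintro (h | ⟨pre, suf, h⟩)
        · exact h
        · rcases pre with _ | ⟨x, pre⟩ <;> simp at h
    | cons b t' =>
      simp only [List.tail_cons, List.zip_cons_cons, List.foldl_cons]
      simp only [List.tail_cons] at ih
      rw [ih]
      have hmem : v ∈ (if a == b then PySem.Set.add s b else s) ↔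
          v ∈ s ∨ (a = b ∧ v = b) := by
        by_cases hab : a = b
        · simp [hab, PySem.Set.mem_add]
        · simp [hab]
      rw [hmem]
      constructor
      · rintro ((hs | ⟨hab, hvb⟩) | ⟨pre, suf, hd⟩)
        · exact Or.inl hs
        · exact Or.inr ⟨[], t', by simp [hab, hvb]⟩
        · exact Or.inr ⟨a :: pre, suf, by simp [hd]⟩
      · rintro (hs | ⟨pre, suf, hd⟩)
        · exact Or.inl (Or.inl hs)
        · rcases pre with _ | ⟨x, pre⟩
          · simp only [List.nil_append, List.cons.injEq] at hd
            exact Or.inl (Or.inr ⟨by rw [hd.1, hd.2.1], by rw [hd.2.1]⟩)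
          · simp only [List.cons_append, List.cons.injEq] at hd
            exact Or.inr ⟨pre, suf, hd.2⟩

-- in a ≤-sorted list, an adjacent equal pair at value v exists iff v occurs ≥ 2 times
lemma adj_iff_count (ys : List Int) (hs : ys.Pairwise (· ≤ ·)) (v : Int) :
    (∃ pre suf, ys = pre ++ v :: v :: suf) ↔ 2 ≤ ys.count v := by
  constructor
  · rintro ⟨pre, suf, rfl⟩
    simp [List.count_append, List.count_cons_self]
    omega
  · intro h2
    induction ys with
    | nil => simp at h2
    | cons a t ih =>
      cases t with
      | nil =>
        have hle := List.count_le_length (a := v) (l := [a])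
        simp at hle; omega
      | cons b t' =>
        rcases List.pairwise_cons.mp hs with ⟨hale, hst⟩
        by_cases hva : v = a
        · subst hva
          have hmem : v ∈ b :: t' := by
            rw [List.count_cons_self] at h2
            exact List.count_pos_iff.mp (by omega)
          have hvb : v = b := by
            rcases List.mem_cons.mp hmem with h | h
            · exact h
            · have h1 : v ≤ b := hale b (by simp)
              have h2' : b ≤ v := (List.pairwise_cons.mp hst).1 v h
              omega
          exact ⟨[], t', by simp [hvb]⟩
        · have h2' : 2 ≤ (b :: t').count v := by
            rw [List.count_cons] at h2
            simp [Ne.symm hva] at h2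
            exact h2
          rcases ih hst h2' with ⟨pre, suf, hd⟩
          exact ⟨a :: pre, suf, by simp [hd]⟩

lemma b_eq_filter (xs : List Int) :
    repeated_filter_alt xs = xs.filter (fun v => 2 ≤ xs.count v) := by
  unfold repeated_filter_alt
  simp only [PySem.List.slice_from_one]
  apply List.filter_congr
  intro x _
  set ys := PySem.List.sorted xs (fun x => x) false with hys
  have hp : ys.Pairwise (· ≤ ·) := by
    have := PySem.List.sorted_pairwise xs (fun x => x) (κ := Int)
    simpa [hys] using this
  have hperm : ys.Perm xs := PySem.List.sorted_perm xs (fun x => x) false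
  have hiff : (x ∈ (ys.zip ys.tail).foldl
      (fun (s : PySem.Set Int) ab => if ab.1 == ab.2 then PySem.Set.add s ab.2 else s)
      PySem.Set.empty) ↔ 2 ≤ xs.count x := by
    rw [mem_dup_fold, adj_iff_count ys hp, hperm.count_eq]
    simp [PySem.Set.empty]
  rw [Bool.eq_iff_iff]
  simp only [PySem.Set.contains_iff, decide_eq_true_eq]
  exact hiff

-- ===== VERDICT (by name: the statement is the Claim_ definition above) =====
theorem repeated_filter_spec : Claim_equal_repeated_filter := by
  intro xs _
  unfold Spec_repeated_filter
  rw [a_eq_filter, b_eq_filter]
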